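-- pv_equiv track=rewrite | github.com/meenalgada142/WaveEye | Preprocessing/mapping/merge_map_signals.py | merge_two_tables
-- ===== SOURCE A (Python) =====
-- def pad(row, length):
--     if len(row) < length:
--         return row + [""] * (length - len(row))
--     return row[:length]
--
-- def merge_two_tables(class1, head1, data1, class2, head2, data2):
--     keep_idx2 = [j for j, n in enumerate(head2) if n not in head1]
--
--     merged_class = class1 + [class2[j] for j in keep_idx2]
--     merged_head  = head1  + [head2[j] for j in keep_idx2]
--
--     len1, len2 = len(head1), len(head2)
--     max_len = max(len(data1), len(data2))
--
--     merged_data = []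
--     for i in range(max_len):
--         r1 = pad(data1[i], len1) if i < len(data1) else [""] * len1
--         r2 = pad(data2[i], len2) if i < len(data2) else [""] * len2
--         merged_data.append(r1 + [r2[j] for j in keep_idx2])
--
--     return merged_class, merged_head, merged_data
-- ===== SOURCE B (Python) =====
-- def merge_two_tables(class1, head1, data1, class2, head2, data2):
--     keep_idx2 = [j for j, n in enumerate(head2) if n not in head1]
--
--     merged_class = class1 + [class2[j] for j in keep_idx2]
--     merged_head  = head1  + [head2[j] for j in keep_idx2]
--
--     max_len = max(len(data1), len(data2))
--
--     def column(data, c):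
--         return [data[i][c] if i < len(data) and c < len(data[i]) else ""
--                 for i in range(max_len)]
--
--     cols = [column(data1, c) for c in range(len(head1))] \
--          + [column(data2, j) for j in keep_idx2]
--
--     if cols:
--         merged_data = [list(r) for r in zip(*cols)]
--     else:
--         merged_data = [[] for _ in range(max_len)]
--
--     return merged_class, merged_head, merged_data
-- ===== Notes on version B (the rewrite author's own statement) =====
-- stated objective: alternative
-- what changed: The data block is built column-by-column (each cell fetched directly, no pad/truncate of rows) and then transposed with zip, instead of A's row-major loop that pads/truncates each row.
import Mathlib
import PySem

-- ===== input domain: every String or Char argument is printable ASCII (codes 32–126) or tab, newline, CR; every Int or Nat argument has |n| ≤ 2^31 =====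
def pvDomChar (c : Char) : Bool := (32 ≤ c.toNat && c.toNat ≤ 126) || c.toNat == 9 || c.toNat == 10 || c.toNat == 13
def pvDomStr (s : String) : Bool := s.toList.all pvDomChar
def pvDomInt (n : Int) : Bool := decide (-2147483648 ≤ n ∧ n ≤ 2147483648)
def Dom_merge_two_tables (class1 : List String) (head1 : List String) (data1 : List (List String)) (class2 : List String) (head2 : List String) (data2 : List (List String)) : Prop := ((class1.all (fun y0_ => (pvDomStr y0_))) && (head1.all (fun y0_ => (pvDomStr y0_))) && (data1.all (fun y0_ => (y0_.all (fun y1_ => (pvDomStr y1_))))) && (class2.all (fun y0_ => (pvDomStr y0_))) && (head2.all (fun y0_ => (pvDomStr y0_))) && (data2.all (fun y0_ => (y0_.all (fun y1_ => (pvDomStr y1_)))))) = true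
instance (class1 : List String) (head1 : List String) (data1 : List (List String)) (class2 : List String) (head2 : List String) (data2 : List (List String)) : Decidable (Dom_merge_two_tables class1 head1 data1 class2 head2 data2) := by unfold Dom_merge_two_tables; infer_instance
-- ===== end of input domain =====

-- B builds the merged data block column-by-column (direct cell access, no row pad/truncate) and transposes, instead of A's row-major padding loop; same cost, alternative structure.


-- ===== PORT A =====
-- pad(row, length): if len(row) < length: row + [""]*(length-len(row)) else row[:length]
def pyPad (row : List String) (length : Nat) : List String :=
  if row.length < length then row ++ List.replicate (length - row.length) ""
  else row.take length

-- keep_idx2 = [j for j, n in enumerate(head2) if n not in head1]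
def keepIdx2 (head1 head2 : List String) : List Nat :=
  ((head2.zipIdx).filter (fun p => ¬ head1.contains p.1)).map (fun p => p.2)

-- Under Pre_ every j ∈ keep_idx2 is in range of class2 (and always of head2 and of the padded
-- rows), so Python's raising xs[j] is ported as getD; outside Pre_ the Python raises.
def merge_two_tables (class1 : List String) (head1 : List String) (data1 : List (List String)) (class2 : List String) (head2 : List String) (data2 : List (List String)) : List String × List String × List (List String) :=
  let keep_idx2 := keepIdx2 head1 head2
  let merged_class := class1 ++ keep_idx2.map (fun j => class2.getD j "")
  let merged_head := head1 ++ keep_idx2.map (fun j => head2.getD j "")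
  let len1 := head1.length
  let len2 := head2.length
  let max_len := max data1.length data2.length
  let merged_data := (List.range max_len).map (fun i =>
    let r1 := if i < data1.length then pyPad (data1.getD i []) len1 else List.replicate len1 ""
    let r2 := if i < data2.length then pyPad (data2.getD i []) len2 else List.replicate len2 ""
    r1 ++ keep_idx2.map (fun j => r2.getD j ""))
  (merged_class, merged_head, merged_data)

-- ===== PORT B =====
-- cell = data[i][c] if i < len(data) and c < len(data[i]) else ""
def pyCell (data : List (List String)) (i c : Nat) : String :=
  (data.getD i []).getD c ""

def pyColumn (data : List (List String)) (maxLen c : Nat) : List String :=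
  (List.range maxLen).map (fun i => pyCell data i c)

def merge_two_tables_alt (class1 : List String) (head1 : List String) (data1 : List (List String)) (class2 : List String) (head2 : List String) (data2 : List (List String)) : List String × List String × List (List String) :=
  let keep_idx2 := keepIdx2 head1 head2
  let merged_class := class1 ++ keep_idx2.map (fun j => class2.getD j "")
  let merged_head := head1 ++ keep_idx2.map (fun j => head2.getD j "")
  let max_len := max data1.length data2.length
  let cols := (List.range head1.length).map (fun c => pyColumn data1 max_len c)
              ++ keep_idx2.map (fun j => pyColumn data2 max_len j)
  let merged_data :=
    if cols.isEmpty then List.replicate max_len []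
    else (List.range max_len).map (fun i => cols.map (fun col => col.getD i ""))
  (merged_class, merged_head, merged_data)

-- ===== PRECONDITION & SPEC =====
-- Pre_ excludes exactly the inputs on which A raises IndexError: a kept column index of head2
-- (one whose name is not in head1) that is out of range of class2.
def Pre_merge_two_tables (class1 : List String) (head1 : List String) (data1 : List (List String)) (class2 : List String) (head2 : List String) (data2 : List (List String)) : Prop :=
  ∀ j ∈ List.range head2.length, head1.contains (head2.getD j "") = true ∨ j < class2.length
instance (class1 : List String) (head1 : List String) (data1 : List (List String)) (class2 : List String) (head2 : List String) (data2 : List (List String)) : Decidable (Pre_merge_two_tables class1 head1 data1 class2 head2 data2) := by unfold Pre_merge_two_tables; infer_instance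
def pvWitness_merge_two_tables : List String × List String × List (List String) × List String × List String × List (List String) :=
  (["c1"], ["a"], [["1", "2"], ["3"]], ["c2", "c3"], ["a", "b"], [["4", "5"]])

def Spec_merge_two_tables (class1 : List String) (head1 : List String) (data1 : List (List String)) (class2 : List String) (head2 : List String) (data2 : List (List String)) (out : List String × List String × List (List String)) : Prop := out = merge_two_tables_alt class1 head1 data1 class2 head2 data2
instance (class1 : List String) (head1 : List String) (data1 : List (List String)) (class2 : List String) (head2 : List String) (data2 : List (List String)) (out : List String × List String × List (List String)) : Decidable (Spec_merge_two_tables class1 head1 data1 class2 head2 data2 out) := by unfold Spec_merge_two_tables; infer_instance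

-- ===== CLAIM (what is proved, stated in full; the proofs are below) =====
def Claim_equal_merge_two_tables : Prop := ∀ (class1 : List String) (head1 : List String) (data1 : List (List String)) (class2 : List String) (head2 : List String) (data2 : List (List String)), Dom_merge_two_tables class1 head1 data1 class2 head2 data2 → Pre_merge_two_tables class1 head1 data1 class2 head2 data2 → Spec_merge_two_tables class1 head1 data1 class2 head2 data2 (merge_two_tables class1 head1 data1 class2 head2 data2)

-- ===== LEMMAS AND PROOFS =====

-- pad of a row equals the per-cell formula over the row's columns
theorem pyPad_eq (row : List String) (n : Nat) :
    pyPad row n = (List.range n).map (fun c => row.getD c "") := by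
  apply List.ext_getElem
  · simp [pyPad]; split <;> simp <;> omega
  · intro c h1 h2
    simp only [List.length_map, List.length_range] at h2
    simp only [pyPad] at h1 ⊢
    simp only [List.getElem_map, List.getElem_range, List.getD_eq_getElem?_getD]
    by_cases hc : c < row.length
    · rw [List.getElem?_eq_getElem hc]
      split
      · rw [List.getElem_append_left hc]; rfl
      · rw [List.getElem_take]; rfl
    · have hrow : row.length ≤ c := by omega
      rw [List.getElem?_eq_none_iff.mpr hrow]
      split <;> rename_i hlt
      · rw [List.getElem_append_right hrow, List.getElem_replicate]; rfl
      · omega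

theorem getD_range_map {α : Type} (f : Nat → α) (n j : Nat) (d : α) (h : j < n) :
    ((List.range n).map f).getD j d = f j := by
  simp [List.getD_eq_getElem?_getD, h]

-- A's row i equals the per-cell formula
theorem rowA_eq (data : List (List String)) (len i : Nat) :
    (if i < data.length then pyPad (data.getD i []) len else List.replicate len "") =
      (List.range len).map (fun c => pyCell data i c) := by
  split <;> rename_i h
  · rw [pyPad_eq]; rfl
  · have hnone : data[i]? = none :=
      List.getElem?_eq_none_iff.mpr (by omega : data.length ≤ i)
    simp [pyCell, List.getD_eq_getElem?_getD, hnone]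

theorem keepIdx2_lt (head1 head2 : List String) (j : Nat) (hj : j ∈ keepIdx2 head1 head2) :
    j < head2.length := by

  simp [keepIdx2, List.mem_filter] at hj
  obtain ⟨n, hn, _⟩ := hj
  have := List.mem_zipIdx hn
  omega

theorem merge_two_tables_spec' (class1 : List String) (head1 : List String) (data1 : List (List String)) (class2 : List String) (head2 : List String) (data2 : List (List String)) :
    merge_two_tables class1 head1 data1 class2 head2 data2 = merge_two_tables_alt class1 head1 data1 class2 head2 data2 := by
  unfold merge_two_tables merge_two_tables_alt
  refine Prod.ext rfl (Prod.ext rfl ?_)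
  simp only
  set keep := keepIdx2 head1 head2 with hkeep
  set maxLen := max data1.length data2.length with hml
  -- the B-side transpose formula at a valid row index
  have hB : ∀ i, i < maxLen →
      (((List.range head1.length).map (fun c => pyColumn data1 maxLen c)
          ++ keep.map (fun j => pyColumn data2 maxLen j)).map (fun col => col.getD i ""))
      = (List.range head1.length).map (fun c => pyCell data1 i c)
        ++ keep.map (fun j => pyCell data2 i j) := by
    intro i hi
    simp only [List.map_append, List.map_map]
    congr 1
    · apply List.map_congr_left; intro c _
      show (pyColumn data1 maxLen c).getD i "" = _
      rw [pyColumn, getD_range_map _ _ _ _ hi]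
    · apply List.map_congr_left; intro j _
      show (pyColumn data2 maxLen j).getD i "" = _
      rw [pyColumn, getD_range_map _ _ _ _ hi]
  split <;> rename_i hempty
  · -- no columns at all: head1 = [] and keep = []; every row of A is []
    rw [List.isEmpty_iff, List.append_eq_nil_iff, List.map_eq_nil_iff, List.map_eq_nil_iff,
      List.range_eq_nil] at hempty
    obtain ⟨h1, h2⟩ := hempty
    apply List.ext_getElem
    · simp
    · intro i hi _
      simp only [List.getElem_map, List.getElem_range, List.getElem_replicate]
      rw [rowA_eq data1 head1.length _]
      simp [h1, h2]
  · apply List.map_congr_left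
    intro i hi
    rw [hB i (List.mem_range.mp hi), rowA_eq data1 head1.length i]
    congr 1
    apply List.map_congr_left
    intro j hjk
    have hj2 : j < head2.length := keepIdx2_lt head1 head2 j hjk
    rw [rowA_eq data2 head2.length i]
    exact getD_range_map _ _ _ _ hj2

-- ===== VERDICT (by name: the statement is the Claim_ definition above) =====
theorem merge_two_tables_spec : Claim_equal_merge_two_tables := by
  intro class1 head1 data1 class2 head2 data2 _ _
  exact merge_two_tables_spec' class1 head1 data1 class2 head2 data2
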